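-- pv_equiv track=rewrite | github.com/Mobink980/Python_programs | assembler.py | label_address_calculator
-- ===== SOURCE A (Python) =====
-- def label_address_calculator(instructions):
--     count = 0
--     for i in range(len(instructions)):
--         if (":" in instructions[i].lower()):
--             break
--
--         else:
--             if ("load" in instructions[i].lower()):
--                 count += 2
--             else:
--                 #the instruction is either Add or Sub
--                 count += 1
--
--     return count
-- ===== SOURCE B (Python) =====
-- def label_address_calculator(instructions):
--     labels = [i for i, s in enumerate(instructions) if ":" in s.lower()]
--     prefix = instructions[:labels[0]] if labels else instructions
--     return len(prefix) + sum("load" in s.lower() for s in prefix)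
-- ===== Notes on version B (the rewrite author's own statement) =====
-- stated objective: simpler
-- what changed: Replaces the accumulate-with-break loop by a two-pass structure: locate the first label index, slice the pre-label prefix, and return len(prefix) plus the number of load instructions in it (each pre-label instruction contributes 1, loads one more).
import Mathlib
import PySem

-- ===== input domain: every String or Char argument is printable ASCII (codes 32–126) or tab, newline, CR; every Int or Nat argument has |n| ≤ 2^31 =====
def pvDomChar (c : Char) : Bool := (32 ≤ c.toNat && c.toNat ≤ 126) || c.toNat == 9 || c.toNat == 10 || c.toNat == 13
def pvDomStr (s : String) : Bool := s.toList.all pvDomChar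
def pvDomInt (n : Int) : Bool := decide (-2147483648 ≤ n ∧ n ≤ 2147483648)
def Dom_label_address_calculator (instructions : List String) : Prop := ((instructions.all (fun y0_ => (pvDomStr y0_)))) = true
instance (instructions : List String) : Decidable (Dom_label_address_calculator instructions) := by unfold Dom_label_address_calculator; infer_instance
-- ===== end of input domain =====

-- B replaces A's accumulate-with-break loop by "find the first label index, slice the prefix,
-- return len(prefix) + number of loads in it"; objective: simpler decomposition, same O(n) cost.

-- ===== PORT A =====
-- The `for i in range(len(instructions))` loop with `break` walks the list accumulating `count`;
-- the break becomes stopping the recursion.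
def labelAddrLoopA : List String → Int → Int
  | [], count => count
  | s :: rest, count =>
    if PySem.Str.isIn ":" (PySem.Str.lower s) then count
    else if PySem.Str.isIn "load" (PySem.Str.lower s) then labelAddrLoopA rest (count + 2)
    else labelAddrLoopA rest (count + 1)

def label_address_calculator (instructions : List String) : Int :=
  labelAddrLoopA instructions 0

-- ===== PORT B =====
-- `labels = [i for i, s in enumerate(instructions) if ":" in s.lower()]` and
-- `prefix = instructions[:labels[0]] if labels else instructions` from Source B
def labelPrefixB (instructions : List String) : List String :=
  match ((PySem.List.enumerate instructions 0).filter
      (fun p => PySem.Str.isIn ":" (PySem.Str.lower p.2))).map (·.1) with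
  | [] => instructions
  | i :: _ => PySem.List.slice instructions none (some i)

-- `len(prefix) + sum("load" in s.lower() for s in prefix)`
def label_address_calculator_alt (instructions : List String) : Int :=
  ((labelPrefixB instructions).length : Int)
    + ((labelPrefixB instructions).map
        (fun s => if PySem.Str.isIn "load" (PySem.Str.lower s) then (1 : Int) else 0)).sum

-- ===== PRECONDITION & SPEC =====
def Spec_label_address_calculator (instructions : List String) (out : Int) : Prop := out = label_address_calculator_alt instructions
instance (instructions : List String) (out : Int) : Decidable (Spec_label_address_calculator instructions out) := by unfold Spec_label_address_calculator; infer_instance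

-- ===== CLAIM (what is proved, stated in full; the proofs are below) =====
def Claim_equal_label_address_calculator : Prop := ∀ (instructions : List String), Dom_label_address_calculator instructions → Spec_label_address_calculator instructions (label_address_calculator instructions)

-- ===== LEMMAS AND PROOFS =====

-- A's loop adds to its accumulator the weighted count of the pre-label takeWhile prefix
theorem labelAddrLoopA_eq (xs : List String) :
    ∀ c : Int, labelAddrLoopA xs c
      = c + (((xs.takeWhile (fun s => !PySem.Str.isIn ":" (PySem.Str.lower s))).length : Int)
          + ((xs.takeWhile (fun s => !PySem.Str.isIn ":" (PySem.Str.lower s))).map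
              (fun s => if PySem.Str.isIn "load" (PySem.Str.lower s) then (1 : Int) else 0)).sum) := by
  induction xs with
  | nil => intro c; simp [labelAddrLoopA]
  | cons x xs ih =>
    intro c
    by_cases h : PySem.Chars.isIn [':'] (PySem.Chars.lower x.toList)
    · simp [labelAddrLoopA, h]
    · by_cases hl : PySem.Chars.isIn ['l', 'o', 'a', 'd'] (PySem.Chars.lower x.toList) <;>
        simp [labelAddrLoopA, h, hl, ih] <;> ring_nf

-- head of B's label-index list, for any enumerate start
theorem labelIdx_head (xs : List String) : ∀ n : Int,
    (((PySem.List.enumerate xs n).filter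
        (fun p => PySem.Str.isIn ":" (PySem.Str.lower p.2))).map (·.1)).head?
      = if xs.any (fun s => PySem.Str.isIn ":" (PySem.Str.lower s)) then
          some (n + ((xs.takeWhile (fun s => !PySem.Str.isIn ":" (PySem.Str.lower s))).length : Int))
        else none := by
  induction xs with
  | nil => intro n; simp [PySem.List.enumerate_nil]
  | cons x xs ih =>
    intro n
    by_cases h : PySem.Chars.isIn [':'] (PySem.Chars.lower x.toList)
    · simp [PySem.List.enumerate_cons, h]
    · rw [PySem.List.enumerate_cons]
      simp only [List.filter_cons, List.any_cons, List.takeWhile_cons]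
      rw [if_neg (by simp [h]), ih (n + 1)]
      by_cases ha : xs.any (fun s => PySem.Str.isIn ":" (PySem.Str.lower s)) <;>
        simp [h, ha] <;> ring_nf

-- take (takeWhile p xs).length xs = takeWhile p xs
theorem take_length_takeWhile {α : Type} (p : α → Bool) (xs : List α) :
    xs.take (xs.takeWhile p).length = xs.takeWhile p := by
  induction xs with
  | nil => simp
  | cons x xs ih => by_cases h : p x <;> simp [h, ih]

-- B's prefix is exactly the pre-label takeWhile prefix
theorem labelPrefixB_eq (xs : List String) :
    labelPrefixB xs = xs.takeWhile (fun s => !PySem.Str.isIn ":" (PySem.Str.lower s)) := by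
  unfold labelPrefixB
  have hhead := labelIdx_head xs 0
  by_cases ha : xs.any (fun s => PySem.Str.isIn ":" (PySem.Str.lower s))
  · rw [if_pos ha, zero_add] at hhead
    cases hL : ((PySem.List.enumerate xs 0).filter
        (fun p => PySem.Str.isIn ":" (PySem.Str.lower p.2))).map (·.1) with
    | nil => rw [hL] at hhead; simp at hhead
    | cons i rest =>
      rw [hL] at hhead
      simp only [List.head?_cons, Option.some.injEq] at hhead
      rw [hhead]
      show PySem.List.slice xs none
          (some ((xs.takeWhile (fun s => !PySem.Str.isIn ":" (PySem.Str.lower s))).length : Int)) = _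
      rw [PySem.List.slice_to_natCast]
      exact take_length_takeWhile _ xs
  · rw [if_neg ha] at hhead
    rw [List.head?_eq_none_iff.mp hhead]
    refine (List.takeWhile_eq_self_iff.mpr ?_).symm
    intro x hx
    simp only [List.any_eq_true, not_exists, not_and] at ha
    have h := ha x hx
    simp only [Bool.not_eq_true] at h ⊢
    simp at h
    simp [h]

-- ===== VERDICT (by name: the statement is the Claim_ definition above) =====
theorem label_address_calculator_spec : Claim_equal_label_address_calculator := by
  intro xs _
  unfold Spec_label_address_calculator label_address_calculator label_address_calculator_alt
  rw [labelAddrLoopA_eq xs 0, labelPrefixB_eq xs, zero_add]
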